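-- pv_equiv track=rewrite | github.com/miruts-xz/competitive-programming | contests/contest-15/Remove Adjacent.py | solve
-- ===== SOURCE A (Python) =====
-- def solve(n, string):
--     string = [c for c in string]
--     ans = 0
--     def valid(i, char):
--         if char == 'a': return False
--         nbr = chr(ord(char)-1)
--         return (i-1 >= 0 and string[i-1]==nbr) or (i+1 < len(string) and string[i+1] == nbr)
--     _maxxIdx = None
--     while string:
--         _maxxIdx = None
--         for i, c in enumerate(string):
--             if valid(i,c):
--                 if _maxxIdx is not None:
--                     if c > string[_maxxIdx]:
--                         _maxxIdx = i
--                 else: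
--                     _maxxIdx = i
--         if _maxxIdx is None: break
--         string.pop(_maxxIdx)
--     return n-len(string)
-- ===== SOURCE B (Python) =====
-- def solve(n, string):
--     # One pass per character code, from highest to lowest: a removable character
--     # can never become removable again once all higher codes are processed, so a
--     # single descending sweep with a resumable cursor removes the same set.
--     s = list(string)
--     for code in range(126, 0, -1):
--         ch = chr(code)
--         nbr = chr(code - 1)
--         if ch == 'a':
--             continue
--         i = 0
--         while i < len(s):
--             if s[i] == ch and ((i > 0 and s[i-1] == nbr) or (i + 1 < len(s) and s[i+1] == nbr)):
--                 s.pop(i)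
--                 if i:
--                     i -= 1
--             else:
--                 i += 1
--     return n - len(s)
-- ===== Notes on version B (the rewrite author's own statement) =====
-- stated objective: faster
-- what changed: A repeatedly rescans the whole list for the globally largest removable character and pops it (one full scan with Python-level valid() calls per removal); B instead makes one descending sweep per character code (126..1) with a cursor that backs up one step after each removal, which removes the same characters in the same order because deleting a valid character can never make a character of a higher code removable.
import Mathlib
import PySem

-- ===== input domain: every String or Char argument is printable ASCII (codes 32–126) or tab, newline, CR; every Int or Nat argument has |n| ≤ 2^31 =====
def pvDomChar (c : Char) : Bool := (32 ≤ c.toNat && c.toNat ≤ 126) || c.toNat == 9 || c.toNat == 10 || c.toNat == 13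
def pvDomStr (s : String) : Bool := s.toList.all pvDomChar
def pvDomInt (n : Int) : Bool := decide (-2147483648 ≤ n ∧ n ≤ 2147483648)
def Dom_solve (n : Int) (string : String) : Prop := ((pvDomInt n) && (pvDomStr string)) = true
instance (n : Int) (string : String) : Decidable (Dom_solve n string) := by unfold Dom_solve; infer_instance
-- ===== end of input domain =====

-- B replaces A's repeated global argmax scans by one descending sweep per character
-- code with a resumable cursor (objective: faster by a constant factor; measured).

-- ===== PORT A =====
-- valid(i, char) of A; index i is a Python int.  chr(ord(char)-1) is Char.ofNat (toNat-1)
-- (exact for the domain's characters, whose codes are ≥ 1).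
def validA (s : List Char) (i : Int) (c : Char) : Bool :=
  if c == 'a' then false
  else
    let nbr := Char.ofNat (c.toNat - 1)
    (decide (0 ≤ i - 1) && (PySem.List.pyGetD s (i - 1) ' ' == nbr))
      || (decide (i + 1 < (s.length : Int)) && (PySem.List.pyGetD s (i + 1) ' ' == nbr))

-- the body of A's `for i, c in enumerate(string)` accumulation of _maxxIdx
def stepA (s : List Char) (acc : Option Int) (ic : Int × Char) : Option Int :=
  if validA s ic.1 ic.2 then
    match acc with
    | some m => if PySem.List.pyGetD s m ' ' < ic.2 then some ic.1 else acc
    | none => some ic.1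
  else acc

def scanA (s : List Char) : Option Int :=
  (PySem.List.enumerate s).foldl (stepA s) none

-- A's while-loop; each iteration pops one element, so `s.length` iterations suffice
-- as fuel for the call in `solve`.
def loopA : Nat → List Char → List Char
  | 0, s => s
  | f + 1, s =>
    if s.isEmpty then s
    else
      match scanA s with
      | none => s
      | some i =>
        match PySem.List.pop? s i with
        | some p => loopA f p.2
        | none => s   -- unreachable: scanA only returns in-range indices

def solve (n : Int) (string : String) : Int :=
  let s := string.toList
  n - ((loopA s.length s).length : Int)

-- ===== PORT B =====
-- the inner `while i < len(s)` loop of Source B for one character ch (nbr = chr(ord(ch)-1))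
def innerB (ch nbr : Char) (s : List Char) (i : Nat) : List Char :=
  if h : i < s.length then
    if s.getD i ' ' == ch
        && ((decide (0 < i) && (s.getD (i - 1) ' ' == nbr))
            || (decide (i + 1 < s.length) && (s.getD (i + 1) ' ' == nbr))) then
      innerB ch nbr (s.eraseIdx i) (i - 1)
    else
      innerB ch nbr s (i + 1)
  else s
termination_by 2 * s.length - i
decreasing_by
  · have hl : (s.eraseIdx i).length = s.length - 1 := by
      simp [List.length_eraseIdx, h]
    omega
  · omega

-- the body of Source B's `for code in range(126, 0, -1)`
def stepB (s : List Char) (code : Int) : List Char :=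
  let ch := Char.ofNat code.toNat
  let nbr := Char.ofNat (code - 1).toNat
  if ch == 'a' then s else innerB ch nbr s 0

def solve_alt (n : Int) (string : String) : Int :=
  let final := (PySem.List.pyRange 126 0 (-1)).foldl stepB string.toList
  n - (final.length : Int)

-- ===== PRECONDITION & SPEC =====
def Spec_solve (n : Int) (string : String) (out : Int) : Prop := out = solve_alt n string
instance (n : Int) (string : String) (out : Int) : Decidable (Spec_solve n string out) := by unfold Spec_solve; infer_instance

-- ===== CLAIM (what is proved, stated in full; the proofs are below) =====
def Claim_equal_solve : Prop := ∀ (n : Int) (string : String), Dom_solve n string → Spec_solve n string (solve n string)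

-- ===== LEMMAS AND PROOFS =====


-- Nat-indexed validity predicate used by the proofs (both ports' conditions reduce to it)
def vN (s : List Char) (k : Nat) : Bool :=
  !(s.getD k ' ' == 'a')
    && ((decide (1 ≤ k) && (s.getD (k - 1) ' ' == Char.ofNat ((s.getD k ' ').toNat - 1)))
        || (decide (k + 1 < s.length) && (s.getD (k + 1) ' ' == Char.ofNat ((s.getD k ' ').toNat - 1))))

-- "position k holds a valid character of code K"
def pB (K : Nat) (s : List Char) (k : Nat) : Bool :=
  vN s k && ((s.getD k ' ').toNat == K)

def firstAux (K : Nat) (s : List Char) (k : Nat) : Option Nat :=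
  if h : k < s.length then (if pB K s k then some k else firstAux K s (k + 1)) else none
termination_by s.length - k

def firstP (K : Nat) (s : List Char) : Option Nat := firstAux K s 0

lemma firstAux_spec (K : Nat) (s : List Char) :
    ∀ k i, firstAux K s k = some i →
      k ≤ i ∧ i < s.length ∧ pB K s i = true ∧ ∀ j, k ≤ j → j < i → pB K s j = false := by
  intro k
  induction k using firstAux.induct K s with
  | case1 k h hp =>
    intro i hi
    rw [firstAux, dif_pos h, if_pos hp] at hi
    cases hi
    exact ⟨le_rfl, h, hp, fun j h1 h2 => absurd h1 (by omega)⟩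
  | case2 k h hp ih =>
    intro i hi
    rw [firstAux, dif_pos h, if_neg hp] at hi
    obtain ⟨h1, h2, h3, h4⟩ := ih i hi
    refine ⟨by omega, h2, h3, fun j hj1 hj2 => ?_⟩
    rcases Nat.eq_or_lt_of_le hj1 with rfl | hlt
    · exact Bool.eq_false_iff.mpr hp
    · exact h4 j hlt hj2
  | case3 k h =>
    intro i hi
    rw [firstAux, dif_neg h] at hi
    cases hi

lemma firstAux_none (K : Nat) (s : List Char) :
    ∀ k, firstAux K s k = none → ∀ j, k ≤ j → j < s.length → pB K s j = false := by
  intro k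
  induction k using firstAux.induct K s with
  | case1 k h hp => intro hn; rw [firstAux, dif_pos h, if_pos hp] at hn; cases hn
  | case2 k h hp ih =>
    intro hn j hj1 hj2
    rw [firstAux, dif_pos h, if_neg hp] at hn
    rcases Nat.eq_or_lt_of_le hj1 with rfl | hlt
    · exact Bool.eq_false_iff.mpr hp
    · exact ih hn j hlt hj2
  | case3 k h => intro _ j hj1 hj2; exact absurd hj2 (by omega)

lemma firstAux_of (K : Nat) (s : List Char) (i : Nat) (hi : i < s.length) (hp : pB K s i = true)
    (hmin : ∀ j, j < i → pB K s j = false) :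
    ∀ k, k ≤ i → firstAux K s k = some i := by
  intro k hk
  induction hd : i - k generalizing k with
  | zero =>
    have : k = i := by omega
    subst this
    rw [firstAux, dif_pos hi, if_pos hp]
  | succ d ih =>
    have hklen : k < s.length := by omega
    rw [firstAux, dif_pos hklen, if_neg (Bool.eq_false_iff.mp (hmin k (by omega)) : ¬ _)]
    exact ih (k + 1) (by omega) (by omega)

def remAll (K : Nat) (s : List Char) : List Char :=
  match h : firstP K s with
  | none => s
  | some i => remAll K (s.eraseIdx i)
termination_by s.length
decreasing_by
  have := (firstAux_spec K s 0 i h).2.1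
  simp [List.length_eraseIdx, this]
  omega

lemma remAll_erase {K : Nat} {s : List Char} {i : Nat} (h : firstP K s = some i) :
    remAll K s = remAll K (s.eraseIdx i) := by
  rw [remAll]
  split
  · rename_i h' ; rw [h] at h'; cases h'
  · rename_i j h' ; rw [h] at h'; cases h'; rfl

lemma remAll_id {K : Nat} {s : List Char} (h : firstP K s = none) : remAll K s = s := by
  rw [remAll]
  split
  · rfl
  · rename_i j h'; rw [h] at h'; cases h'

-- getD through eraseIdx
lemma getD_erase_lt (s : List Char) (i j : Nat) (d : Char) (h : j < i) :
    (s.eraseIdx i).getD j d = s.getD j d := by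
  simp [List.getD_eq_getElem?_getD, List.getElem?_eraseIdx, h]

lemma getD_erase_ge (s : List Char) (i j : Nat) (d : Char) (h : i ≤ j) :
    (s.eraseIdx i).getD j d = s.getD (j + 1) d := by
  simp [List.getD_eq_getElem?_getD, List.getElem?_eraseIdx, Nat.not_lt.mpr h]

-- character code arithmetic
lemma toNat_ofNat_small {n : Nat} (h : n < 55296) : (Char.ofNat n).toNat = n := by
  rw [Char.toNat_ofNat, if_pos (Or.inl h)]

lemma char_eq_of_toNat {a b : Char} (h : a.toNat = b.toNat) : a = b := by
  calc a = Char.ofNat a.toNat := (Char.ofNat_toNat a).symm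
    _ = Char.ofNat b.toNat := by rw [h]
    _ = b := Char.ofNat_toNat b

lemma char_eq_ofNat_iff {c : Char} {n : Nat} (h : n < 55296) :
    (c = Char.ofNat n) ↔ c.toNat = n := by
  constructor
  · rintro rfl; exact toNat_ofNat_small h
  · intro hc; exact char_eq_of_toNat (by rw [hc, toNat_ofNat_small h])

lemma char_lt_iff {a b : Char} : a < b ↔ a.toNat < b.toNat :=
  Char.lt_def.trans UInt32.lt_iff_toNat_lt

lemma char_a_iff {c : Char} : c = 'a' ↔ c.toNat = 97 := by
  have h : 'a' = Char.ofNat 97 := by decide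
  rw [h]
  exact char_eq_ofNat_iff (by omega)

def charsOK (s : List Char) : Prop := ∀ c ∈ s, 1 ≤ c.toNat ∧ c.toNat ≤ 126

lemma charsOK_erase {s : List Char} (h : charsOK s) (i : Nat) : charsOK (s.eraseIdx i) :=
  fun c hc => h c (List.Sublist.mem hc (List.eraseIdx_sublist s i))

lemma getD_mem {s : List Char} {k : Nat} (h : k < s.length) : s.getD k ' ' ∈ s := by
  rw [List.getD_eq_getElem _ _ h]
  exact List.getElem_mem h


-- generic foldl helpers
lemma foldl_inv {α σ : Type} {g : σ → α → σ} {I : σ → Prop} :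
    ∀ (l : List α) (a : σ), (∀ x ∈ l, ∀ b, I b → I (g b x)) → I a → I (l.foldl g a) := by
  intro l
  induction l with
  | nil => intro a _ ha; exact ha
  | cons x xs ih =>
    intro a hstep ha
    exact ih (g a x) (fun y hy b hb => hstep y (List.mem_cons_of_mem x hy) b hb)
      (hstep x List.mem_cons_self a ha)

lemma foldl_fix {α σ : Type} {g : σ → α → σ} {a : σ} :
    ∀ (l : List α), (∀ x ∈ l, g a x = a) → l.foldl g a = a := by
  intro l
  induction l with
  | nil => intro _; rfl
  | cons x xs ih =>
    intro h
    rw [List.foldl_cons, h x List.mem_cons_self]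
    exact ih fun y hy => h y (List.mem_cons_of_mem x hy)

lemma foldl_congr_fun {α σ : Type} {g₁ g₂ : σ → α → σ} (h : ∀ a x, g₁ a x = g₂ a x) :
    ∀ (l : List α) (a : σ), l.foldl g₁ a = l.foldl g₂ a := by
  intro l
  induction l with
  | nil => intro a; rfl
  | cons x xs ih => intro a; rw [List.foldl_cons, List.foldl_cons, h, ih]

-- A's valid on a Nat index is vN
lemma validA_nat (s : List Char) (k : Nat) : validA s (k : Int) (s.getD k ' ') = vN s k := by
  simp only [validA, vN]
  by_cases ha : s.getD k ' ' = 'a'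
  · rw [if_pos (by rw [ha, beq_self_eq_true])]
    rw [ha]
    simp
  · rw [if_neg (by rw [beq_iff_eq]; exact ha)]
    have hna : (s.getD k ' ' == 'a') = false := by rw [beq_eq_false_iff_ne]; exact ha
    rw [hna]
    simp only [Bool.not_false, Bool.true_and]
    by_cases hk : 1 ≤ k
    · have h1 : (k : Int) - 1 = ((k - 1 : Nat) : Int) := by omega
      have h2 : (k : Int) + 1 = ((k + 1 : Nat) : Int) := by omega
      rw [h1, h2, PySem.List.pyGetD_natCast, PySem.List.pyGetD_natCast]
      have d1 : decide ((0 : Int) ≤ ((k - 1 : Nat) : Int)) = decide (1 ≤ k) := by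
        rw [decide_eq_decide]; omega
      have d2 : decide (((k + 1 : Nat) : Int) < (s.length : Int)) = decide (k + 1 < s.length) := by
        rw [decide_eq_decide]; omega
      rw [d1, d2]
    · have hk0 : k = 0 := by omega
      subst hk0
      have h2 : ((0 : Nat) : Int) + 1 = ((0 + 1 : Nat) : Int) := by omega
      rw [h2, PySem.List.pyGetD_natCast]
      have d1 : decide ((0 : Int) ≤ ((0 : Nat) : Int) - 1) = false := by
        rw [decide_eq_false_iff_not]; omega
      have d2 : decide (((0 + 1 : Nat) : Int) < (s.length : Int)) = decide (0 + 1 < s.length) := by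
        rw [decide_eq_decide]; omega
      have d3 : decide (1 ≤ (0 : Nat)) = false := by rfl
      rw [d1, d2, d3]
      simp only [Bool.false_and, Bool.false_or]

-- A's accumulator step, on a Nat index
def stepN (s : List Char) (acc : Option Int) (k : Nat) : Option Int :=
  if vN s k then
    match acc with
    | some m => if PySem.List.pyGetD s m ' ' < s.getD k ' ' then some (k : Int) else acc
    | none => some (k : Int)
  else acc

lemma stepA_eq_stepN (s : List Char) (acc : Option Int) (k : Nat) :
    stepA s acc ((k : Int), s.getD k ' ') = stepN s acc k := by
  simp only [stepA, stepN]
  rw [validA_nat]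

lemma stepN_not {s : List Char} {k : Nat} (hv : vN s k = false) (a : Option Int) :
    stepN s a k = a := by
  unfold stepN
  rw [hv]
  simp

lemma stepN_none {s : List Char} {k : Nat} (hv : vN s k = true) :
    stepN s none k = some (k : Int) := by
  unfold stepN
  rw [if_pos hv]

lemma stepN_some_lt {s : List Char} {k : Nat} {m : Int} (hv : vN s k = true)
    (hc : PySem.List.pyGetD s m ' ' < s.getD k ' ') : stepN s (some m) k = some (k : Int) := by
  unfold stepN
  rw [if_pos hv]
  show (if PySem.List.pyGetD s m ' ' < s.getD k ' ' then some ((k : Nat) : Int) else some m)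
      = some (k : Int)
  rw [if_pos hc]

lemma stepN_some_ge {s : List Char} {k : Nat} {m : Int} (hv : vN s k = true)
    (hc : ¬ PySem.List.pyGetD s m ' ' < s.getD k ' ') : stepN s (some m) k = some m := by
  unfold stepN
  rw [if_pos hv]
  show (if PySem.List.pyGetD s m ' ' < s.getD k ' ' then some ((k : Nat) : Int) else some m)
      = some m
  rw [if_neg hc]

lemma scanA_eq (s : List Char) : scanA s = (List.range s.length).foldl (stepN s) none := by
  unfold scanA
  rw [PySem.List.enumerate_eq_map_pyRange s ' ', List.foldl_map, PySem.List.pyRange_one,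
    List.foldl_map]
  have hlen : ((PySem.List.len s - 0).toNat) = s.length := by
    simp [PySem.List.len]
  rw [hlen]
  apply foldl_congr_fun
  intro a x
  have h0 : (0 : Int) + (x : Int) = (x : Int) := by omega
  rw [h0, PySem.List.pyGetD_natCast]
  exact stepA_eq_stepN s a x

lemma scanA_none {s : List Char} (h : ∀ j, j < s.length → vN s j = false) : scanA s = none := by
  rw [scanA_eq]
  apply foldl_fix
  intro x hx
  exact stepN_not (h x (List.mem_range.mp hx)) none

-- invariant of A's scan over positions before the first code-K hit
def invLt (K : Nat) (s : List Char) (a : Option Int) : Prop :=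
  a = none ∨ ∃ m : Nat, a = some (m : Int) ∧ m < s.length ∧ vN s m = true ∧
    (s.getD m ' ').toNat < K

lemma scanA_some {K : Nat} {s : List Char}
    (hle : ∀ j, j < s.length → vN s j = true → (s.getD j ' ').toNat ≤ K)
    {i : Nat} (hfp : firstP K s = some i) : scanA s = some (i : Int) := by
  obtain ⟨-, hilen, hpi, hmin0⟩ := firstAux_spec K s 0 i hfp
  have hmin : ∀ j, j < i → pB K s j = false := fun j hj => hmin0 j (Nat.zero_le j) hj
  have hpi' : vN s i = true ∧ (s.getD i ' ').toNat = K := by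
    simpa [pB] using hpi
  rw [scanA_eq]
  have hsplit : List.range s.length
      = List.range' 0 i ++ i :: List.range' (i + 1) (s.length - i - 1) := by
    have h2 : List.range' i (s.length - i) = i :: List.range' (i + 1) (s.length - i - 1) := by
      obtain ⟨m, hm⟩ : ∃ m, s.length - i = m + 1 := ⟨s.length - i - 1, by omega⟩
      rw [hm, List.range'_succ]
      norm_num
    have h1 : List.range' 0 i ++ List.range' (0 + 1 * i) (s.length - i)
        = List.range' 0 (i + (s.length - i)) := List.range'_append
    simp only [Nat.zero_add, Nat.one_mul] at h1
    have h3 : i + (s.length - i) = s.length := by omega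
    rw [h3] at h1
    rw [List.range_eq_range', ← h1, h2]
  rw [hsplit, List.foldl_append, List.foldl_cons]
  have h1 : invLt K s ((List.range' 0 i).foldl (stepN s) none) := by
    apply foldl_inv
    · intro x hx b hb
      have hxi : x < i := by
        have := List.mem_range'_1.mp hx
        omega
      have hxlen : x < s.length := by omega
      by_cases hv : vN s x = true
      · have hx_ltK : (s.getD x ' ').toNat < K := by
          have hne : ¬ ((s.getD x ' ').toNat = K) := by
            intro hEq
            have hpx : pB K s x = true := by
              rw [pB, hv, Bool.true_and, beq_iff_eq]
              exact hEq
            rw [hmin x hxi] at hpx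
            cases hpx
          have := hle x hxlen hv
          omega
        rcases hb with hb | ⟨m, hb, hm1, hm2, hm3⟩
        · subst hb
          rw [stepN_none hv]
          exact Or.inr ⟨x, rfl, hxlen, hv, hx_ltK⟩
        · subst hb
          by_cases hc : PySem.List.pyGetD s ((m : Nat) : Int) ' ' < s.getD x ' '
          · rw [stepN_some_lt hv hc]
            exact Or.inr ⟨x, rfl, hxlen, hv, hx_ltK⟩
          · rw [stepN_some_ge hv hc]
            exact Or.inr ⟨m, rfl, hm1, hm2, hm3⟩
      · rw [stepN_not (Bool.not_eq_true _ ▸ hv) b]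
        exact hb
    · exact Or.inl rfl
  have h2 : stepN s ((List.range' 0 i).foldl (stepN s) none) i = some (i : Int) := by
    rcases h1 with hb | ⟨m, hb, hm1, hm2, hm3⟩
    · rw [hb, stepN_none hpi'.1]
    · rw [hb]
      have hcmp : PySem.List.pyGetD s ((m : Nat) : Int) ' ' < s.getD i ' ' := by
        rw [PySem.List.pyGetD_natCast, char_lt_iff]
        omega
      rw [stepN_some_lt hpi'.1 hcmp]
  rw [h2]
  apply foldl_fix
  intro x hx
  have hxr : i + 1 ≤ x ∧ x < i + 1 + (s.length - i - 1) := List.mem_range'_1.mp hx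
  have hxlen : x < s.length := by omega
  by_cases hv : vN s x = true
  · have hcmp : ¬ (PySem.List.pyGetD s ((i : Nat) : Int) ' ' < s.getD x ' ') := by
      rw [PySem.List.pyGetD_natCast, char_lt_iff]
      have := hle x hxlen hv
      omega
    rw [stepN_some_ge hv hcmp]
  · rw [stepN_not (Bool.not_eq_true _ ▸ hv) (some (i : Int))]


-- Prop form of vN
def VP (s : List Char) (k : Nat) : Prop :=
  s.getD k ' ' ≠ 'a' ∧
    ((1 ≤ k ∧ s.getD (k - 1) ' ' = Char.ofNat ((s.getD k ' ').toNat - 1)) ∨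
     (k + 1 < s.length ∧ s.getD (k + 1) ' ' = Char.ofNat ((s.getD k ' ').toNat - 1)))

lemma vN_iff {s : List Char} {k : Nat} : vN s k = true ↔ VP s k := by
  simp [vN, VP]

lemma pB_iff {K : Nat} {s : List Char} {k : Nat} :
    pB K s k = true ↔ VP s k ∧ (s.getD k ' ').toNat = K := by
  rw [pB, Bool.and_eq_true, vN_iff, beq_iff_eq]

lemma ofNat_inj_small {a b : Nat} (ha : a < 55296) (hb : b < 55296)
    (h : Char.ofNat a = Char.ofNat b) : a = b := by
  rw [← toNat_ofNat_small ha, h, toNat_ofNat_small hb]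

-- KEY LEMMA: removing a valid character of code ≤ K never creates a valid character of
-- code > K (only the two neighbours of the removed position can become newly valid, and
-- their codes are then the removed code or one below it).
lemma vN_erase_le {K : Nat} {s : List Char} {i : Nat} (hlen : i < s.length) (hok : charsOK s)
    (hle : ∀ j, j < s.length → vN s j = true → (s.getD j ' ').toNat ≤ K)
    (hvi : vN s i = true) (hKi : (s.getD i ' ').toNat ≤ K) :
    ∀ j, j < (s.eraseIdx i).length → vN (s.eraseIdx i) j = true →
      ((s.eraseIdx i).getD j ' ').toNat ≤ K := by
  intro j hj hvj
  have hlen' : (s.eraseIdx i).length = s.length - 1 := by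
    simp [List.length_eraseIdx, hlen]
  rw [hlen'] at hj
  have hchar : ∀ k, k < s.length → 1 ≤ (s.getD k ' ').toNat ∧ (s.getD k ' ').toNat ≤ 126 :=
    fun k hk => hok _ (getD_mem hk)
  rw [vN_iff] at hvj hvi
  obtain ⟨hx1, hx2⟩ := hvi
  obtain ⟨hy1, hy2⟩ := hvj
  by_cases hji : j < i
  · -- position j is left of the removed index
    rw [getD_erase_lt s i j ' ' hji] at hy1 hy2 ⊢
    rcases hy2 with ⟨hj1, hL⟩ | ⟨hj2, hR⟩
    · rw [getD_erase_lt s i (j - 1) ' ' (by omega)] at hL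
      exact hle j (by omega) (vN_iff.mpr ⟨hy1, Or.inl ⟨hj1, hL⟩⟩)
    · rw [hlen'] at hj2
      by_cases hj1i : j + 1 < i
      · rw [getD_erase_lt s i (j + 1) ' ' hj1i] at hR
        exact hle j (by omega) (vN_iff.mpr ⟨hy1, Or.inr ⟨by omega, hR⟩⟩)
      · have hEq : j + 1 = i := by omega
        rw [hEq, getD_erase_ge s i i ' ' le_rfl] at hR
        -- now s.getD (i+1) = Char.ofNat ((s.getD j).toNat - 1), with j = i - 1
        rcases hx2 with ⟨hi1, hxl⟩ | ⟨hi2, hxr⟩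
        · -- s.getD (i-1) = x⁻ and y = s.getD j = s.getD (i-1)
          have hj_eq : j = i - 1 := by omega
          rw [hj_eq] at hy1 ⊢
          rw [hxl]
          have hxb := hchar i hlen
          rw [toNat_ofNat_small (by omega)]
          omega
        · -- s.getD (i+1) = x⁻ and also = y⁻
          rw [hxr] at hR
          have hxb := hchar i hlen
          have hyb := hchar j (by omega)
          have := ofNat_inj_small (by omega) (by omega) hR
          omega
  · -- position j is at or right of the removed index: it was position j+1 in s
    rw [Nat.not_lt] at hji
    rw [getD_erase_ge s i j ' ' hji] at hy1 hy2 ⊢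
    rcases hy2 with ⟨hj1, hL⟩ | ⟨hj2, hR⟩
    · by_cases hj1i : i ≤ j - 1
      · rw [getD_erase_ge s i (j - 1) ' ' hj1i] at hL
        have hL' : s.getD ((j + 1) - 1) ' ' = Char.ofNat ((s.getD (j + 1) ' ').toNat - 1) := by
          have : (j - 1) + 1 = (j + 1) - 1 := by omega
          rw [← this]
          exact hL
        exact hle (j + 1) (by omega) (vN_iff.mpr ⟨hy1, Or.inl ⟨by omega, hL'⟩⟩)
      · have hEq : j = i := by omega
        subst hEq
        rw [getD_erase_lt s j (j - 1) ' ' (by omega)] at hL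
        rcases hx2 with ⟨hi1, hxl⟩ | ⟨hi2, hxr⟩
        · rw [hxl] at hL
          have hxb := hchar j hlen
          have hyb := hchar (j + 1) (by omega)
          have := ofNat_inj_small (by omega) (by omega) hL
          omega
        · rw [hxr]
          have hxb := hchar j hlen
          rw [toNat_ofNat_small (by omega)]
          omega
    · rw [hlen'] at hj2
      rw [getD_erase_ge s i (j + 1) ' ' (by omega)] at hR
      exact hle (j + 1) (by omega) (vN_iff.mpr ⟨hy1, Or.inr ⟨by omega, hR⟩⟩)


-- B's inner-loop condition at a Nat index is pB
lemma condB_iff {K : Nat} {s : List Char} {i : Nat} (hK1 : 1 ≤ K) (hK2 : K ≤ 126)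
    (hK97 : K ≠ 97) :
    (s.getD i ' ' == Char.ofNat K
        && ((decide (0 < i) && (s.getD (i - 1) ' ' == Char.ofNat (K - 1)))
            || (decide (i + 1 < s.length) && (s.getD (i + 1) ' ' == Char.ofNat (K - 1)))))
      = pB K s i := by
  by_cases hp : pB K s i = true
  · rw [hp]
    obtain ⟨⟨hne, hd⟩, hKv⟩ := pB_iff.mp hp
    have hc : s.getD i ' ' = Char.ofNat K := (char_eq_ofNat_iff (by omega)).mpr hKv
    have hnbr : Char.ofNat ((s.getD i ' ').toNat - 1) = Char.ofNat (K - 1) := by rw [hKv]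
    rw [hnbr] at hd
    simp only [hc, beq_self_eq_true, Bool.true_and]
    rw [Bool.or_eq_true_iff]
    rcases hd with ⟨h1, h2⟩ | ⟨h1, h2⟩
    · exact Or.inl (by rw [h2, beq_self_eq_true, Bool.and_true]; exact decide_eq_true (by omega))
    · exact Or.inr (by rw [h2, beq_self_eq_true, Bool.and_true]; exact decide_eq_true h1)
  · rw [Bool.not_eq_true] at hp
    rw [hp]
    rw [Bool.eq_false_iff]
    intro hcond
    apply absurd hp
    rw [Bool.not_eq_false, pB_iff]
    obtain ⟨hc, hd⟩ := Bool.and_eq_true_iff.mp hcond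
    have hc' : s.getD i ' ' = Char.ofNat K := beq_iff_eq.mp hc
    have hKv : (s.getD i ' ').toNat = K := (char_eq_ofNat_iff (by omega)).mp hc'
    have hnbr : Char.ofNat (K - 1) = Char.ofNat ((s.getD i ' ').toNat - 1) := by rw [hKv]
    refine ⟨⟨fun ha => hK97 (by rw [← hKv, char_a_iff.mp ha]), ?_⟩, hKv⟩
    rcases Bool.or_eq_true_iff.mp hd with h | h
    · obtain ⟨h1, h2⟩ := Bool.and_eq_true_iff.mp h
      exact Or.inl ⟨by simpa using h1, by rw [← hnbr]; exact beq_iff_eq.mp h2⟩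
    · obtain ⟨h1, h2⟩ := Bool.and_eq_true_iff.mp h
      exact Or.inr ⟨by simpa using h1, by rw [← hnbr]; exact beq_iff_eq.mp h2⟩

-- pB transfers from the erased list back to s left of the erased index
lemma pB_erase_left {K : Nat} {s : List Char} {i j : Nat} (hij : j + 1 < i)
    (hp : pB K (s.eraseIdx i) j = true) : pB K s j = true := by
  rw [pB_iff] at hp ⊢
  obtain ⟨⟨h1, h2⟩, h3⟩ := hp
  rw [getD_erase_lt s i j ' ' (by omega)] at h1 h2 h3
  refine ⟨⟨h1, ?_⟩, h3⟩
  rcases h2 with ⟨ha, hb⟩ | ⟨ha, hb⟩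
  · rw [getD_erase_lt s i (j - 1) ' ' (by omega)] at hb
    exact Or.inl ⟨ha, hb⟩
  · rw [getD_erase_lt s i (j + 1) ' ' (by omega)] at hb
    have hlen := List.length_eraseIdx_le s i
    exact Or.inr ⟨by omega, hb⟩

lemma innerB_eq_remAll (K : Nat) (hK1 : 1 ≤ K) (hK2 : K ≤ 126) (hK97 : K ≠ 97) :
    ∀ n s i, 2 * s.length - i ≤ n → i ≤ s.length →
      (∀ j, j < i → pB K s j = false) →
      innerB (Char.ofNat K) (Char.ofNat (K - 1)) s i = remAll K s := by
  intro n
  induction n with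
  | zero =>
    intro s i hn hi hmin
    have hs0 : s.length = 0 := by omega
    have hi0 : i = 0 := by omega
    subst hi0
    rw [innerB, dif_neg (by omega)]
    have hfp : firstP K s = none := by
      cases hfp : firstP K s with
      | none => rfl
      | some m =>
        have := (firstAux_spec K s 0 m hfp).2.1
        omega
    rw [remAll_id hfp]
  | succ n ihn =>
    intro s i hn hi hmin
    by_cases h : i < s.length
    · rw [innerB, dif_pos h, condB_iff hK1 hK2 hK97]
      by_cases hp : pB K s i = true
      · rw [if_pos hp]
        have hfp : firstP K s = some i := firstAux_of K s i h hp hmin 0 (Nat.zero_le i)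
        rw [remAll_erase hfp]
        have hlen' : (s.eraseIdx i).length = s.length - 1 := by
          simp [List.length_eraseIdx, h]
        apply ihn
        · omega
        · omega
        · intro j hj
          rw [Bool.eq_false_iff]
          intro hpj
          have := pB_erase_left (by omega) hpj
          rw [hmin j (by omega)] at this
          cases this
      · rw [if_neg (by rw [Bool.not_eq_true] at hp; rw [hp]; exact Bool.false_ne_true)]
        apply ihn
        · omega
        · omega
        · intro j hj
          rcases Nat.lt_or_ge j i with hji | hji
          · exact hmin j hji
          · have : j = i := by omega
            subst this
            exact Bool.not_eq_true _ ▸ hp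
    · rw [innerB, dif_neg h]
      have hfp : firstP K s = none := by
        cases hfp : firstP K s with
        | none => rfl
        | some m =>
          obtain ⟨-, hm, hpm, -⟩ := firstAux_spec K s 0 m hfp
          rw [hmin m (by omega)] at hpm
          cases hpm
      rw [remAll_id hfp]

lemma innerB_remAll {K : Nat} (hK1 : 1 ≤ K) (hK2 : K ≤ 126) (hK97 : K ≠ 97) (s : List Char) :
    innerB (Char.ofNat K) (Char.ofNat (K - 1)) s 0 = remAll K s :=
  innerB_eq_remAll K hK1 hK2 hK97 (2 * s.length) s 0 le_rfl (Nat.zero_le _) (by omega)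

-- unfolding A's while loop
lemma loopA_none {f : Nat} {s : List Char} (h : scanA s = none) : loopA f s = s := by
  cases f with
  | zero => rfl
  | succ f =>
    rw [loopA, h]
    split <;> rfl

lemma loopA_step {f : Nat} {s : List Char} {i : Nat} (hi : i < s.length)
    (h : scanA s = some (i : Int)) : loopA (f + 1) s = loopA f (s.eraseIdx i) := by
  have hne : ¬ s.isEmpty = true := by
    rw [List.isEmpty_iff]
    intro hnil
    subst hnil
    simp at hi
  rw [loopA, if_neg hne, h]
  dsimp only
  rw [PySem.List.pop?_natCast s i hi]

-- the descending code list of B, as Nats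
def down : Nat → List Int
  | 0 => []
  | k + 1 => ((k + 1 : Nat) : Int) :: down k

lemma pyRange_down : ∀ k : Nat, PySem.List.pyRange ((k : Nat) : Int) 0 (-1) = down k := by
  intro k
  induction k with
  | zero => exact PySem.List.pyRange_neg_one_eq_nil (by omega)
  | succ k ih =>
    rw [PySem.List.pyRange_neg_one_cons (by omega)]
    rw [show (((k + 1 : Nat) : Int) - 1) = ((k : Nat) : Int) by omega, ih]
    rfl

lemma stepB_nat {k : Nat} (hk : k ≤ 126) (s : List Char) :
    stepB s ((k : Nat) : Int)
      = if k = 97 then s else innerB (Char.ofNat k) (Char.ofNat (k - 1)) s 0 := by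
  unfold stepB
  have h1 : ((k : Nat) : Int).toNat = k := by omega
  have h2 : (((k : Nat) : Int) - 1).toNat = k - 1 := by omega
  rw [h1, h2]
  by_cases h97 : k = 97
  · subst h97
    rw [if_pos (by decide), if_pos rfl]
  · rw [if_neg (fun hc => h97 (ofNat_inj_small (by omega) (by omega)
      (by rw [beq_iff_eq] at hc; rw [hc]))), if_neg h97]

lemma stepB_nil (code : Int) : stepB [] code = [] := by
  unfold stepB
  dsimp only
  split
  · rfl
  · rw [innerB, dif_neg (by simp)]

-- MAIN INDUCTION: A's greedy loop equals B's descending sweeps, given that every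
-- currently valid character has code ≤ K
lemma main_ind : ∀ K : Nat, K ≤ 126 → ∀ s f, s.length ≤ f → charsOK s →
    (∀ j, j < s.length → vN s j = true → (s.getD j ' ').toNat ≤ K) →
    loopA f s = (down K).foldl stepB s := by
  intro K
  induction K with
  | zero =>
    intro _ s f hf hok hle
    have hnone : ∀ j, j < s.length → vN s j = false := by
      intro j hj
      rw [Bool.eq_false_iff]
      intro hv
      have h1 := hle j hj hv
      have h2 := (hok _ (getD_mem hj)).1
      omega
    rw [loopA_none (scanA_none hnone)]
    rfl
  | succ K ih =>
    intro hK126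
    suffices H : ∀ n s f, s.length ≤ n → s.length ≤ f → charsOK s →
        (∀ j, j < s.length → vN s j = true → (s.getD j ' ').toNat ≤ K + 1) →
        loopA f s = (down (K + 1)).foldl stepB s by
      intro s f hf hok hle
      exact H s.length s f le_rfl hf hok hle
    intro n
    induction n with
    | zero =>
      intro s f h0 hf hok hle
      have hnil : s = [] := List.eq_nil_of_length_eq_zero (by omega)
      subst hnil
      rw [loopA_none (scanA_none (by intro j hj; simp at hj))]
      rw [foldl_fix _ (fun x _ => stepB_nil x)]
    | succ n ihn =>
      intro s f hn hf hok hle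
      have hd : down (K + 1) = ((K + 1 : Nat) : Int) :: down K := rfl
      by_cases hK97 : K + 1 = 97
      · rw [hd, List.foldl_cons, stepB_nat (by omega), if_pos hK97]
        apply ih (by omega) s f hf hok
        intro j hj hv
        have h1 := hle j hj hv
        have h2 : (s.getD j ' ').toNat ≠ 97 := by
          intro hc
          exact (vN_iff.mp hv).1 (char_a_iff.mpr hc)
        omega
      · cases hfp : firstP (K + 1) s with
        | none =>
          have hle' : ∀ j, j < s.length → vN s j = true → (s.getD j ' ').toNat ≤ K := by
            intro j hj hv
            have h1 := hle j hj hv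
            have h2 : pB (K + 1) s j = false := firstAux_none _ s 0 hfp j (Nat.zero_le j) hj
            have h3 : ¬ ((s.getD j ' ').toNat = K + 1) := by
              intro hc
              rw [Bool.eq_false_iff] at h2
              exact h2 (pB_iff.mpr ⟨vN_iff.mp hv, hc⟩)
            omega
          rw [hd, List.foldl_cons, stepB_nat (by omega), if_neg hK97,
            innerB_remAll (by omega) (by omega) hK97, remAll_id hfp]
          exact ih (by omega) s f hf hok hle'
        | some i =>
          obtain ⟨-, hilen, hpi, -⟩ := firstAux_spec _ s 0 i hfp
          have hscan := scanA_some hle hfp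
          obtain ⟨f', rfl⟩ : ∃ f', f = f' + 1 := ⟨f - 1, by omega⟩
          rw [loopA_step hilen hscan]
          have hlen' : (s.eraseIdx i).length = s.length - 1 := by
            simp [List.length_eraseIdx, hilen]
          have hKi : (s.getD i ' ').toNat = K + 1 := (pB_iff.mp hpi).2
          have hvi : vN s i = true := vN_iff.mpr (pB_iff.mp hpi).1
          have hle'' := vN_erase_le hilen hok hle hvi (le_of_eq hKi)
          rw [ihn (s.eraseIdx i) f' (by omega) (by omega) (charsOK_erase hok i) hle'']
          rw [hd, List.foldl_cons, List.foldl_cons]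
          rw [stepB_nat (by omega), if_neg hK97, stepB_nat (by omega), if_neg hK97]
          rw [innerB_remAll (by omega) (by omega) hK97, innerB_remAll (by omega) (by omega) hK97]
          rw [remAll_erase hfp]

-- ===== VERDICT (by name: the statement is the Claim_ definition above) =====
theorem solve_spec : Claim_equal_solve := by
  unfold Claim_equal_solve
  intro n string hdom
  unfold Spec_solve solve solve_alt
  have hok : charsOK string.toList := by
    intro c hc
    have hD : pvDomStr string = true := by
      unfold Dom_solve at hdom
      exact (Bool.and_eq_true_iff.mp hdom).2
    rw [pvDomStr] at hD
    have hc' := List.all_eq_true.mp hD c hc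
    rw [pvDomChar] at hc'
    simp only [Bool.or_eq_true_iff, Bool.and_eq_true_iff, decide_eq_true_eq, beq_iff_eq] at hc'
    omega
  have hle : ∀ j, j < string.toList.length → vN string.toList j = true →
      (string.toList.getD j ' ').toNat ≤ 126 :=
    fun j hj _ => (hok _ (getD_mem hj)).2
  have hmain := main_ind 126 le_rfl string.toList string.toList.length le_rfl hok hle
  dsimp only
  rw [hmain, show (126 : Int) = ((126 : Nat) : Int) from by norm_num, pyRange_down 126]
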